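-- pv_equiv track=rewrite | github.com/ahmadelsallab/table_identification | deployed/tables_detector-class-hocr-template-with_hp_hw/table-detector-2019-01-30-documented.py | is_alignment_suitable
-- ===== SOURCE A (Python) =====
-- def is_alignment_suitable(line, current_separators):
--     # this compares the alignment of two lines for example
--     ########################################################
--     # a suitable alignment: maybe good candidate
--     ########################################################
--     #
--     #    WW W WWW W WW W
--     #    WW W WWW W WW W
--     ########################################################
--     # a bad alignment can't be in the same table
--     ########################################################
--     #
--     #    WW W WWW W WW W
--     #    WWWWWW WWWWWWWW
--     ########################################################
--     for index in range(len(line) + 1):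
--         if index == 0:  # left
--             if current_separators[index] >= line[index]["left"]:
--                 return False
--         elif index == len(line):  # right
--             if line[index - 1]["right"] >= current_separators[index]:
--                 return False
--         else:  # mid
--             if not line[index - 1]["right"] < current_separators[index] < line[index]["left"]:
--                 return False
--
--     return True
-- ===== SOURCE B (Python) =====
-- def is_alignment_suitable(line, current_separators):
--     # structural recursion consuming the cells, threading the previous cell's
--     # right edge as an accumulator; no index arithmetic, no endpoint branches
--     def go(cells, seps, prev_right):
--         if prev_right is not None and not prev_right < seps[0]:
--             return False
--         if not cells:
--             return True
--         cell = cells[0]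
--         if not seps[0] < cell["left"]:
--             return False
--         return go(cells[1:], seps[1:], cell["right"])
--
--     return go(line, current_separators, None)
-- ===== Notes on version B (the rewrite author's own statement) =====
-- stated objective: alternative
-- what changed: B replaces A's indexed loop over separator positions with its three-way left/mid/right branch by a structural recursion that consumes the cell and separator lists in tandem, threading the previous cell's right edge as an accumulator, so one uniform step handles every position.
import Mathlib
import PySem

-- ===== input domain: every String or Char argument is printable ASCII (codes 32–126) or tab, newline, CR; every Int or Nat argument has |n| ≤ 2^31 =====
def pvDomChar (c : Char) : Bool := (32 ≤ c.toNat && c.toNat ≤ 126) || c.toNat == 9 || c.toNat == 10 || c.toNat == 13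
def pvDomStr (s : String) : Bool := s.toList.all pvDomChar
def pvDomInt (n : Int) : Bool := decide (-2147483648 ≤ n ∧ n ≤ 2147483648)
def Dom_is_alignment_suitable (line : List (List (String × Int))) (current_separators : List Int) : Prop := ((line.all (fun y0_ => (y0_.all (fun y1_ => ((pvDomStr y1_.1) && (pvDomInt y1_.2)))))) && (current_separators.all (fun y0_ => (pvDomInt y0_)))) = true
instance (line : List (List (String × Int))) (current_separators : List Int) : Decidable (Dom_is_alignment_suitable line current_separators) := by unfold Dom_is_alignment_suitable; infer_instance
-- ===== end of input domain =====

-- B replaces A's indexed loop with its three-way left/mid/right branch by a structural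
-- recursion over the cells threading the previous right edge as an accumulator (objective: alternative).


-- dict indexing d[k] on an association list: first matching key (none = KeyError)
def lookupKey : List (String × Int) → String → Option Int
  | [], _ => none
  | (k, v) :: rest, key => if k == key then some v else lookupKey rest key

-- ===== PORT A =====
-- the body of A's loop at one index: true = the iteration does not 'return False';
-- a failing access (none) maps to false, but Pre_ excludes those inputs
def aCheck (line : List (List (String × Int))) (cs : List Int) (index : Int) : Bool :=
  if index = 0 then
    match PySem.List.pyGet? cs index, (PySem.List.pyGet? line index).bind (fun c => lookupKey c "left") with
    | some s, some l => !(s ≥ l)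
    | _, _ => false
  else if index = (line.length : Int) then
    match (PySem.List.pyGet? line (index - 1)).bind (fun c => lookupKey c "right"), PySem.List.pyGet? cs index with
    | some r, some s => !(r ≥ s)
    | _, _ => false
  else
    match (PySem.List.pyGet? line (index - 1)).bind (fun c => lookupKey c "right"), PySem.List.pyGet? cs index, (PySem.List.pyGet? line index).bind (fun c => lookupKey c "left") with
    | some r, some s, some l => decide (r < s) && decide (s < l)
    | _, _, _ => false

def aLoop (line : List (List (String × Int))) (cs : List Int) : List Int → Bool
  | [] => true
  | i :: rest => if aCheck line cs i then aLoop line cs rest else false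

def is_alignment_suitable (line : List (List (String × Int))) (current_separators : List Int) : Bool :=
  aLoop line current_separators (PySem.List.pyRange 0 ((line.length : Int) + 1) 1)

-- ===== PORT B =====
-- the first guard of go: prev_right is not None and not prev_right < seps[0]
def bPrevOk (seps : List Int) : Option Int → Bool
  | none => true
  | some pr =>
    match PySem.List.pyGet? seps 0 with
    | some s0 => decide (pr < s0)
    | none => false

-- go(cells, seps, prev_right); a failing access (none) maps to false, excluded by Pre_
def bGo : List (List (String × Int)) → List Int → Option Int → Bool
  | cells, seps, prev =>
    if bPrevOk seps prev then
      match cells with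
      | [] => true
      | c :: rest =>
        match PySem.List.pyGet? seps 0, lookupKey c "left" with
        | some s0, some l =>
          if decide (s0 < l) then
            match lookupKey c "right" with
            | some r => bGo rest (PySem.List.slice seps (some 1) none) (some r)
            | none => false
          else false
        | _, _ => false
    else false

def is_alignment_suitable_alt (line : List (List (String × Int))) (current_separators : List Int) : Bool :=
  bGo line current_separators none

-- ===== PRECONDITION & SPEC =====
-- value of the first pair with the given key (0 if absent; used only under a key-membership guard)
def keyVal (c : List (String × Int)) (k : String) : Int :=
  ((c.find? (fun p => p.1 == k)).map Prod.snd).getD 0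

-- cell k is fully readable and passes both of its comparisons
def PvCellOK (line : List (List (String × Int))) (cs : List Int) (k : Nat) : Bool :=
  decide (k < cs.length ∧ "left" ∈ (line.getD k []).map Prod.fst ∧
    cs.getD k 0 < keyVal (line.getD k []) "left" ∧
    "right" ∈ (line.getD k []).map Prod.fst ∧ k + 1 < cs.length ∧
    keyVal (line.getD k []) "right" < cs.getD (k + 1) 0)

-- at cell k the scan stops at a comparison that is readable but false (so A returns False there)
def PvFailAt (line : List (List (String × Int))) (cs : List Int) (k : Nat) : Bool :=
  decide ((k < cs.length ∧ "left" ∈ (line.getD k []).map Prod.fst ∧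
    ¬ cs.getD k 0 < keyVal (line.getD k []) "left") ∨
  (k < cs.length ∧ "left" ∈ (line.getD k []).map Prod.fst ∧
    cs.getD k 0 < keyVal (line.getD k []) "left" ∧
    "right" ∈ (line.getD k []).map Prod.fst ∧ k + 1 < cs.length ∧
    ¬ keyVal (line.getD k []) "right" < cs.getD (k + 1) 0))

-- Pre_ = exactly the inputs on which A returns: a nonempty line, and its left-to-right scan of
-- comparisons either passes every cell in full or reaches a false comparison before any missing
-- index/key (A raises IndexError/KeyError otherwise — in particular always on an empty line,
-- where B's empty recursion returns True instead).
def Pre_is_alignment_suitable (line : List (List (String × Int))) (current_separators : List Int) : Prop :=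
  line ≠ [] ∧
    ((∀ m, m < line.length → PvCellOK line current_separators m = true) ∨
      (∃ m, m < line.length ∧ (∀ k, k < m → PvCellOK line current_separators k = true) ∧
        PvFailAt line current_separators m = true))
instance (line : List (List (String × Int))) (current_separators : List Int) : Decidable (Pre_is_alignment_suitable line current_separators) := by unfold Pre_is_alignment_suitable; infer_instance

def pvWitness_is_alignment_suitable : (List (List (String × Int))) × List Int :=
  ([[("left", 10), ("right", 20)]], [5, 25])

def Spec_is_alignment_suitable (line : List (List (String × Int))) (current_separators : List Int) (out : Bool) : Prop := out = is_alignment_suitable_alt line current_separators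
instance (line : List (List (String × Int))) (current_separators : List Int) (out : Bool) : Decidable (Spec_is_alignment_suitable line current_separators out) := by unfold Spec_is_alignment_suitable; infer_instance

-- ===== CLAIM (what is proved, stated in full; the proofs are below) =====
def Claim_equal_is_alignment_suitable : Prop := ∀ (line : List (List (String × Int))) (current_separators : List Int), Dom_is_alignment_suitable line current_separators → Pre_is_alignment_suitable line current_separators → Spec_is_alignment_suitable line current_separators (is_alignment_suitable line current_separators)

-- ===== LEMMAS AND PROOFS =====


-- proof-side per-cell check bridging the two ports
def bCheck (line : List (List (String × Int))) (cs : List Int) (i : Int) : Bool :=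
  match PySem.List.pyGet? cs i, (PySem.List.pyGet? line i).bind (fun c => lookupKey c "left"),
        (PySem.List.pyGet? line i).bind (fun c => lookupKey c "right"), PySem.List.pyGet? cs (i + 1) with
  | some s, some l, some r, some s' => decide (s < l) && decide (r < s')
  | _, _, _, _ => false

def bLoop (line : List (List (String × Int))) (cs : List Int) : List Int → Bool
  | [] => true
  | i :: rest => if bCheck line cs i then bLoop line cs rest else false

theorem aLoop_eq_all (line : List (List (String × Int))) (cs : List Int) (L : List Int) :
    aLoop line cs L = L.all (aCheck line cs) := by
  induction L with
  | nil => rfl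
  | cons i rest ih => simp [aLoop, List.all_cons, ih]

theorem bLoop_eq_all (line : List (List (String × Int))) (cs : List Int) (L : List Int) :
    bLoop line cs L = L.all (bCheck line cs) := by
  induction L with
  | nil => rfl
  | cons i rest ih => simp [bLoop, List.all_cons, ih]

theorem aCheck_zero_iff (ln : List (List (String × Int))) (cs : List Int) :
    aCheck ln cs 0 = true ↔ ∃ s l, PySem.List.pyGet? cs 0 = some s ∧
      (PySem.List.pyGet? ln 0).bind (fun c => lookupKey c "left") = some l ∧ s < l := by
  unfold aCheck
  rw [if_pos rfl]
  cases h1 : PySem.List.pyGet? cs 0 <;>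
    cases h2 : (PySem.List.pyGet? ln 0).bind (fun c => lookupKey c "left") <;>
      simp [h1, h2]

theorem aCheck_last_iff (ln : List (List (String × Int))) (cs : List Int) (i : Int)
    (h0 : ¬ i = 0) (hN : i = (ln.length : Int)) :
    aCheck ln cs i = true ↔ ∃ r s, (PySem.List.pyGet? ln (i - 1)).bind (fun c => lookupKey c "right") = some r ∧
      PySem.List.pyGet? cs i = some s ∧ r < s := by
  unfold aCheck
  rw [if_neg h0, if_pos hN]
  cases h1 : (PySem.List.pyGet? ln (i - 1)).bind (fun c => lookupKey c "right") <;>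
    cases h2 : PySem.List.pyGet? cs i <;> simp [h1, h2]

theorem aCheck_mid_iff (ln : List (List (String × Int))) (cs : List Int) (i : Int)
    (h0 : ¬ i = 0) (hN : ¬ i = (ln.length : Int)) :
    aCheck ln cs i = true ↔ ∃ r s l,
      (PySem.List.pyGet? ln (i - 1)).bind (fun c => lookupKey c "right") = some r ∧
      PySem.List.pyGet? cs i = some s ∧
      (PySem.List.pyGet? ln i).bind (fun c => lookupKey c "left") = some l ∧ r < s ∧ s < l := by
  unfold aCheck
  rw [if_neg h0, if_neg hN]
  cases h1 : (PySem.List.pyGet? ln (i - 1)).bind (fun c => lookupKey c "right") <;>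
    cases h2 : PySem.List.pyGet? cs i <;>
      cases h3 : (PySem.List.pyGet? ln i).bind (fun c => lookupKey c "left") <;> simp [h1, h2, h3]

theorem bCheck_iff (ln : List (List (String × Int))) (cs : List Int) (i : Int) :
    bCheck ln cs i = true ↔ ∃ s l r s',
      PySem.List.pyGet? cs i = some s ∧
      (PySem.List.pyGet? ln i).bind (fun c => lookupKey c "left") = some l ∧
      (PySem.List.pyGet? ln i).bind (fun c => lookupKey c "right") = some r ∧
      PySem.List.pyGet? cs (i + 1) = some s' ∧ s < l ∧ r < s' := by
  unfold bCheck
  cases h1 : PySem.List.pyGet? cs i <;>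
    cases h2 : (PySem.List.pyGet? ln i).bind (fun c => lookupKey c "left") <;>
      cases h3 : (PySem.List.pyGet? ln i).bind (fun c => lookupKey c "right") <;>
        cases h4 : PySem.List.pyGet? cs (i + 1) <;> simp [h1, h2, h3, h4]

-- the A port equals the per-cell scan on every nonempty line (no shape assumptions)
theorem A_eq_perCell (ln : List (List (String × Int))) (cs : List Int)
    (hne : ln ≠ []) :
    is_alignment_suitable ln cs = bLoop ln cs (PySem.List.pyRange 0 (ln.length : Int) 1) := by
  have hn : 0 < ln.length := List.length_pos_iff.mpr hne
  unfold is_alignment_suitable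
  rw [aLoop_eq_all, bLoop_eq_all, PySem.List.pyRange_one, PySem.List.pyRange_one]
  rw [Bool.eq_iff_iff]
  simp only [List.all_map, List.all_eq_true, List.mem_range, Function.comp, zero_add,
    Int.sub_zero, Int.toNat_natCast]
  have cast1 : ∀ k : Nat, ((k + 1 : Nat) : Int) - 1 = (k : Int) := by intro k; push_cast; ring
  have cast2 : ∀ k : Nat, ((k : Int) + 1) = ((k + 1 : Nat) : Int) := by intro k; push_cast; ring
  constructor
  · intro H k hk
    rw [bCheck_iff]
    have hcell : ∃ s l, PySem.List.pyGet? cs (k : Int) = some s ∧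
        (PySem.List.pyGet? ln (k : Int)).bind (fun c => lookupKey c "left") = some l ∧ s < l := by
      rcases Nat.eq_zero_or_pos k with h0 | hpos
      · subst h0
        have := (aCheck_zero_iff ln cs).mp (by simpa using H 0 (by omega))
        simpa using this
      · obtain ⟨r, s, l, _, h2, h3, _, h5⟩ :=
          (aCheck_mid_iff ln cs (k : Int) (by omega) (by omega)).mp (H k (by omega))
        exact ⟨s, l, h2, h3, h5⟩
    have hsep : ∃ r s', (PySem.List.pyGet? ln (k : Int)).bind (fun c => lookupKey c "right") = some r ∧
        PySem.List.pyGet? cs ((k : Int) + 1) = some s' ∧ r < s' := by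
      by_cases hlast : k + 1 = ln.length
      · obtain ⟨r, s, h1, h2, h3⟩ :=
          (aCheck_last_iff ln cs ((k + 1 : Nat) : Int) (by omega) (by rw [hlast])).mp
            (H (k + 1) (by omega))
        rw [cast1 k] at h1
        rw [← cast2 k] at h2
        exact ⟨r, s, h1, h2, h3⟩
      · obtain ⟨r, s, l, h1, h2, _, h4, _⟩ :=
          (aCheck_mid_iff ln cs ((k + 1 : Nat) : Int) (by omega) (by omega)).mp
            (H (k + 1) (by omega))
        rw [cast1 k] at h1
        rw [← cast2 k] at h2
        exact ⟨r, s, h1, h2, h4⟩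
    obtain ⟨s, l, hs, hl, hsl⟩ := hcell
    obtain ⟨r, s', hr, hs', hrs⟩ := hsep
    exact ⟨s, l, r, s', hs, hl, hr, hs', hsl, hrs⟩
  · intro H k hk
    rcases Nat.eq_zero_or_pos k with h0 | hpos
    · subst h0
      obtain ⟨s, l, _, _, hs, hl, _, _, hsl, _⟩ := (bCheck_iff ln cs ((0 : Nat) : Int)).mp (H 0 hn)
      have : aCheck ln cs 0 = true := (aCheck_zero_iff ln cs).mpr ⟨s, l, by simpa using hs, by simpa using hl, hsl⟩
      simpa using this
    · by_cases hkn : k = ln.length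
      · obtain ⟨s, l, r, s', _, _, hr, hs', _, hrs⟩ :=
          (bCheck_iff ln cs ((k - 1 : Nat) : Int)).mp (H (k - 1) (by omega))
        refine (aCheck_last_iff ln cs (k : Int) (by omega) (by rw [hkn])).mpr ⟨r, s', ?_, ?_, hrs⟩
        · have e : ((k : Int) - 1) = ((k - 1 : Nat) : Int) := by omega
          rw [e]; exact hr
        · rw [cast2 (k - 1), show k - 1 + 1 = k by omega] at hs'
          exact hs'
      · obtain ⟨s, l, r, s', _, _, hr, hs', _, hrs⟩ :=
          (bCheck_iff ln cs ((k - 1 : Nat) : Int)).mp (H (k - 1) (by omega))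
        obtain ⟨s2, l2, r2, s2', hs2, hl2, _, _, hsl2, _⟩ :=
          (bCheck_iff ln cs (k : Int)).mp (H k (by omega))
        refine (aCheck_mid_iff ln cs (k : Int) (by omega) (by omega)).mpr
          ⟨r, s2, l2, ?_, hs2, hl2, ?_, hsl2⟩
        · have e : ((k : Int) - 1) = ((k - 1 : Nat) : Int) := by omega
          rw [e]; exact hr
        · rw [cast2 (k - 1), show k - 1 + 1 = k by omega] at hs'
          rw [hs'] at hs2
          cases hs2
          exact hrs


-- per-cell readable-and-true condition, the bridge between bGo and the per-cell scan
def cellCond (cells : List (List (String × Int))) (seps : List Int) (k : Nat) : Prop :=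
  ∃ s l r s', seps[k]? = some s ∧ lookupKey (cells.getD k []) "left" = some l ∧
    lookupKey (cells.getD k []) "right" = some r ∧ seps[k + 1]? = some s' ∧ s < l ∧ r < s'

theorem bPrevOk_iff (seps : List Int) (prev : Option Int) :
    bPrevOk seps prev = true ↔ ∀ r, prev = some r → ∃ s, seps[0]? = some s ∧ r < s := by
  cases prev with
  | none => simp [bPrevOk]
  | some pr =>
    have h0 : PySem.List.pyGet? seps 0 = seps[0]? := by
      simpa using PySem.List.pyGet?_natCast (xs := seps) (n := 0)
    unfold bPrevOk
    rw [h0]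
    cases h : seps[0]? <;> simp [h]

theorem bGo_true_iff (cells : List (List (String × Int))) :
    ∀ (seps : List Int) (prev : Option Int),
    bGo cells seps prev = true ↔
      ((∀ r, prev = some r → ∃ s, seps[0]? = some s ∧ r < s) ∧
        ∀ k, k < cells.length → cellCond cells seps k) := by
  induction cells with
  | nil =>
    intro seps prev
    rw [show bGo [] seps prev = if bPrevOk seps prev then true else false from rfl]
    rw [← bPrevOk_iff]
    cases h : bPrevOk seps prev <;> simp [h]
  | cons c rest ih =>
    intro seps prev
    have h0 : PySem.List.pyGet? seps 0 = seps[0]? := by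
      simpa using PySem.List.pyGet?_natCast (xs := seps) (n := 0)
    have hunf : bGo (c :: rest) seps prev =
        if bPrevOk seps prev then
          (match PySem.List.pyGet? seps 0, lookupKey c "left" with
          | some s0, some l =>
            if decide (s0 < l) then
              match lookupKey c "right" with
              | some r => bGo rest (PySem.List.slice seps (some 1) none) (some r)
              | none => false
            else false
          | _, _ => false)
        else false := rfl
    rw [hunf]
    by_cases hp : bPrevOk seps prev = true
    · rw [if_pos hp, h0]
      rw [bPrevOk_iff] at hp
      have htail : ∀ k : Nat, (seps.tail)[k]? = seps[k + 1]? := by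
        intro k
        cases seps with
        | nil => simp
        | cons s ss => simp
      rw [PySem.List.slice_from_one]
      cases hs0 : seps[0]? with
      | none =>
        simp only [iff_def]
        constructor
        · intro h; exact absurd h (by simp)
        · rintro ⟨-, hall⟩
          obtain ⟨s, l, r, s', hs, _⟩ := hall 0 (by simp)
          rw [hs0] at hs
          exact absurd hs (by simp)
      | some s0 =>
        cases hl : lookupKey c "left" with
        | none =>
          simp only [iff_def]
          constructor
          · intro h; exact absurd h (by simp)
          · rintro ⟨-, hall⟩
            obtain ⟨s, l, r, s', _, hlc, _⟩ := hall 0 (by simp)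
            simp only [List.getD_cons_zero] at hlc
            rw [hl] at hlc
            exact absurd hlc (by simp)
        | some l =>
          have hred : (match some s0, some l with
              | some s0, some l =>
                if decide (s0 < l) then
                  match lookupKey c "right" with
                  | some r => bGo rest seps.tail (some r)
                  | none => false
                else false
              | _, _ => false) =
              (if decide (s0 < l) then
                match lookupKey c "right" with
                | some r => bGo rest seps.tail (some r)
                | none => false
              else false) := rfl
          rw [hred]
          by_cases hsl : s0 < l
          · rw [if_pos (by simpa using hsl)]
            cases hr : lookupKey c "right" with
            | none =>
              simp only [iff_def]
              constructor
              · intro h; exact absurd h (by simp)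
              · rintro ⟨-, hall⟩
                obtain ⟨s, l', r, s', _, _, hrc, _⟩ := hall 0 (by simp)
                simp only [List.getD_cons_zero] at hrc
                rw [hr] at hrc
                exact absurd hrc (by simp)
            | some r =>
              rw [ih seps.tail (some r)]
              constructor
              · rintro ⟨hprev, hall⟩
                refine ⟨by rw [hs0] at hp; exact hp, ?_⟩
                intro k hk
                cases k with
                | zero =>
                  obtain ⟨s1, hs1, hrs1⟩ := hprev r rfl
                  rw [htail 0] at hs1
                  exact ⟨s0, l, r, s1, hs0, by simpa [List.getD_cons_zero] using hl,
                    by simpa [List.getD_cons_zero] using hr, hs1, hsl, hrs1⟩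
                | succ k =>
                  obtain ⟨s, l', r', s', h1, h2, h3, h4, h5, h6⟩ := hall k (by simpa using hk)
                  exact ⟨s, l', r', s', by rw [← htail k]; exact h1,
                    by simpa [List.getD_cons_succ] using h2,
                    by simpa [List.getD_cons_succ] using h3,
                    by rw [← htail (k + 1)]; exact h4, h5, h6⟩
              · rintro ⟨-, hall⟩
                constructor
                · rintro r' hr'
                  cases hr'
                  obtain ⟨s, l', r', s', h1, h2, h3, h4, h5, h6⟩ := hall 0 (by simp)
                  rw [hs0] at h1
                  cases h1
                  simp only [List.getD_cons_zero] at h2 h3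
                  rw [hr] at h3
                  cases h3
                  exact ⟨s', by rw [htail 0]; exact h4, h6⟩
                · intro k hk
                  obtain ⟨s, l', r', s', h1, h2, h3, h4, h5, h6⟩ := hall (k + 1) (by simpa using hk)
                  exact ⟨s, l', r', s', by rw [htail k]; exact h1,
                    by simpa [List.getD_cons_succ] using h2,
                    by simpa [List.getD_cons_succ] using h3,
                    by rw [htail (k + 1)]; exact h4, h5, h6⟩
          · rw [if_neg (by simpa using hsl)]
            simp only [iff_def]
            constructor
            · intro h; exact absurd h (by simp)
            · rintro ⟨-, hall⟩
              obtain ⟨s, l', r, s', hs, hlc, _, _, h5, _⟩ := hall 0 (by simp)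
              rw [hs0] at hs
              cases hs
              simp only [List.getD_cons_zero] at hlc
              rw [hl] at hlc
              cases hlc
              exact absurd h5 hsl
    · rw [if_neg hp]
      rw [bPrevOk_iff] at hp
      constructor
      · intro h; simp at h
      · rintro ⟨hprev, -⟩; exact absurd hprev hp
  
-- the per-cell scan equals B's recursion, on every input
theorem perCell_eq_alt (ln : List (List (String × Int))) (cs : List Int) :
    bLoop ln cs (PySem.List.pyRange 0 (ln.length : Int) 1) = is_alignment_suitable_alt ln cs := by
  unfold is_alignment_suitable_alt
  rw [bLoop_eq_all, PySem.List.pyRange_one, Bool.eq_iff_iff]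
  rw [bGo_true_iff]
  simp only [List.all_map, List.all_eq_true, List.mem_range, Function.comp, zero_add,
    Int.sub_zero, Int.toNat_natCast]
  have step : ∀ k : Nat, k < ln.length → (bCheck ln cs (k : Int) = true ↔ cellCond ln cs k) := by
    intro k hk
    rw [bCheck_iff]
    have hgl : PySem.List.pyGet? ln (k : Int) = some (ln.getD k []) := by
      rw [PySem.List.pyGet?_natCast, List.getElem?_eq_getElem hk]
      simp [List.getD_eq_getElem?_getD, List.getElem?_eq_getElem hk]
    have hgc : ∀ j : Nat, PySem.List.pyGet? cs (j : Int) = cs[j]? := by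
      intro j; exact PySem.List.pyGet?_natCast (xs := cs) (n := j)
    have e : ((k : Int) + 1) = ((k + 1 : Nat) : Int) := by push_cast; ring
    rw [hgl, e, hgc k, hgc (k + 1)]
    unfold cellCond
    constructor
    · rintro ⟨s, l, r, s', h1, h2, h3, h4, h5, h6⟩
      exact ⟨s, l, r, s', h1, by simpa using h2, by simpa using h3, h4, h5, h6⟩
    · rintro ⟨s, l, r, s', h1, h2, h3, h4, h5, h6⟩
      exact ⟨s, l, r, s', h1, by simpa using h2, by simpa using h3, h4, h5, h6⟩
  constructor
  · intro H
    refine ⟨by simp, ?_⟩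
    intro k hk
    exact (step k hk).mp (H k hk)
  · rintro ⟨-, hall⟩ k hk
    exact (step k hk).mpr (hall k hk)

-- ===== VERDICT (by name: the statement is the Claim_ definition above) =====
theorem is_alignment_suitable_spec : Claim_equal_is_alignment_suitable := by
  intro line cs _ hpre
  unfold Spec_is_alignment_suitable
  rw [A_eq_perCell line cs hpre.1]
  exact perCell_eq_alt line cs
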